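-- pv_equiv track=rewrite | github.com/Bhavik7173/Telegram-Uploader | model.py | filter_files_by_name_range
-- ===== SOURCE A (Python) =====
-- def filter_files_by_name_range(files, name_filter):
--     """
--     Filters files whose names start with any letter in the range specified.
--     Example input: "A-H" filters files starting with letters A, B, C, ..., H.
--     """
--     name_filter = name_filter.strip()
--     filtered = []
--
--     # Detect if input is in form X-Y (e.g. A-H)
--     if len(name_filter) == 3 and name_filter[1] == '-':
--         start_letter = name_filter[0].upper()
--         end_letter = name_filter[2].upper()
--         if start_letter.isalpha() and end_letter.isalpha() and start_letter <= end_letter: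
--             valid_letters = [chr(c) for c in range(ord(start_letter), ord(end_letter) + 1)]
--             for f in files:
--                 first_char = f[0].upper() if f else ''
--                 if first_char in valid_letters:
--                     filtered.append(f)
--             return filtered
--
--     # Otherwise treat as substring filter (case-insensitive)
--     return [f for f in files if name_filter.lower() in f.lower()]
-- ===== SOURCE B (Python) =====
-- def filter_files_by_name_range(files, name_filter):
--     """Filter by X-Y first-letter range (via a first-letter index) or substring."""
--     nf = name_filter.strip()
--     if len(nf) == 3 and nf[1] == '-':
--         lo, hi = nf[0].upper(), nf[2].upper()
--         if lo.isalpha() and hi.isalpha() and lo <= hi: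
--             # index the files by uppercased first letter, once
--             buckets = {}
--             for i, f in enumerate(files):
--                 key = f[0].upper() if f else ''
--                 buckets.setdefault(key, []).append(i)
--             # collect the buckets of the requested letters, restore input order
--             hits = []
--             for c in range(ord(lo), ord(hi) + 1):
--                 hits.extend(buckets.get(chr(c), []))
--             hits.sort()
--             return [files[i] for i in hits]
--     sub = nf.lower()
--     return [f for f in files if sub in f.lower()]
-- ===== Notes on version B (the rewrite author's own statement) =====
-- stated objective: alternative
-- what changed: The X-Y branch no longer tests each file against a built valid_letters list; B builds a dict index from uppercased first letter to the list of file positions in one pass, concatenates the buckets of the letters in the range, sorts the collected positions and maps them back to files, leaving the substring branch unchanged.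
import Mathlib
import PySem

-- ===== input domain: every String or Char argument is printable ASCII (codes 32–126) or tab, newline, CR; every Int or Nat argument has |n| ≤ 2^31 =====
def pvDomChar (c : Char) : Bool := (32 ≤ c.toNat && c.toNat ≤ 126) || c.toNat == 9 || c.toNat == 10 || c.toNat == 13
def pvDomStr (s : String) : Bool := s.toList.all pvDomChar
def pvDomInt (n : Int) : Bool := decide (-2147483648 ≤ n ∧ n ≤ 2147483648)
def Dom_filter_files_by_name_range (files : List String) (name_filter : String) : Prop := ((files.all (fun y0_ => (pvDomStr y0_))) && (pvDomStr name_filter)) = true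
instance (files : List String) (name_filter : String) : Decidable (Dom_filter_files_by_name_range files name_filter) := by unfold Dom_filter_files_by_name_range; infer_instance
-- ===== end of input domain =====

-- B replaces A's per-file membership test against a built valid_letters list by a first-letter
-- dict index built once: group file positions by uppercased first letter, concatenate the buckets
-- of the letters in the range, sort the positions, map back to files (objective: alternative).

-- ===== PORT A =====
-- shared with port B: both Pythons end with the identical case-insensitive substring comprehension
def pvSubstrFilter (files : List String) (nf : String) : List String :=
  files.filter (fun f => PySem.Str.isIn (PySem.Str.lower nf) (PySem.Str.lower f))

-- [chr(c) for c in range(ord(start_letter), ord(end_letter) + 1)]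
def pvValidLetters (s e : Char) : List Char :=
  (PySem.List.pyRange (s.toNat : Int) ((e.toNat : Int) + 1) 1).map (fun i => Char.ofNat i.toNat)

-- first_char = f[0].upper() if f else ''  (the empty string ported as none; '' is never a member
-- of valid_letters, whose elements are one-character strings, ported as Chars)
def pvFirstUpper? (f : String) : Option Char :=
  match f.toList with
  | [] => none
  | c :: _ => some (PySem.Chars.upperChar c)

-- Python single-character string comparisons ('A' <= 'B', s[1] == '-') are code-point
-- comparisons, ported on Char/toNat; the indexing nf[0], nf[1], nf[2] is exact under the
-- length == 3 guard of the same condition (getD default is never used when it matters).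
def filter_files_by_name_range (files : List String) (name_filter : String) : List String :=
  let nf := PySem.Str.strip name_filter
  let cs := nf.toList
  if cs.length == 3 && cs.getD 1 ' ' == '-' then
    let s := PySem.Chars.upperChar (cs.getD 0 ' ')
    let e := PySem.Chars.upperChar (cs.getD 2 ' ')
    if PySem.Chars.isalpha s && PySem.Chars.isalpha e && decide (s.toNat ≤ e.toNat) then
      files.foldl (fun acc f =>
        if (match pvFirstUpper? f with
            | none => false
            | some c => (pvValidLetters s e).contains c) then acc ++ [f] else acc) []
    else pvSubstrFilter files nf
  else pvSubstrFilter files nf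

-- ===== PORT B =====
-- key = f[0].upper() if f else ''  (a one-character string, or the empty string)
def pvKey (f : String) : String :=
  match f.toList with
  | [] => ""
  | c :: _ => String.ofList [PySem.Chars.upperChar c]

-- buckets.setdefault(key, []).append(i) mutates the stored list; ported as re-inserting the
-- extended list under the same key (insert keeps the key's position), which is the same dict.
def filter_files_by_name_range_alt (files : List String) (name_filter : String) : List String :=
  let nf := PySem.Str.strip name_filter
  let cs := nf.toList
  if cs.length == 3 && cs.getD 1 ' ' == '-' then
    let lo := PySem.Chars.upperChar (cs.getD 0 ' ')
    let hi := PySem.Chars.upperChar (cs.getD 2 ' ')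
    if PySem.Chars.isalpha lo && PySem.Chars.isalpha hi && decide (lo.toNat ≤ hi.toNat) then
      let buckets : PySem.Dict String (List Int) :=
        (PySem.List.enumerate files 0).foldl
          (fun d p => d.insert (pvKey p.2) (PySem.Dict.getD d (pvKey p.2) [] ++ [p.1]))
          PySem.Dict.empty
      let hits := (PySem.List.pyRange (lo.toNat : Int) ((hi.toNat : Int) + 1) 1).foldl
        (fun acc c => acc ++ PySem.Dict.getD buckets (String.ofList [Char.ofNat c.toNat]) []) []
      (PySem.List.sorted hits (fun x => x) false).map (fun i => PySem.List.pyGetD files i "")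
    else pvSubstrFilter files nf
  else pvSubstrFilter files nf

-- ===== PRECONDITION & SPEC =====
def Spec_filter_files_by_name_range (files : List String) (name_filter : String) (out : List String) : Prop := out = filter_files_by_name_range_alt files name_filter
instance (files : List String) (name_filter : String) (out : List String) : Decidable (Spec_filter_files_by_name_range files name_filter out) := by unfold Spec_filter_files_by_name_range; infer_instance

-- ===== CLAIM (what is proved, stated in full; the proofs are below) =====
def Claim_equal_filter_files_by_name_range : Prop := ∀ (files : List String) (name_filter : String), Dom_filter_files_by_name_range files name_filter → Spec_filter_files_by_name_range files name_filter (filter_files_by_name_range files name_filter)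

-- ===== LEMMAS AND PROOFS =====

-- A's per-file test, as a Bool predicate (proof-side only)
def pvPred (lo hi : Char) (f : String) : Bool :=
  match f.toList with
  | [] => false
  | c :: _ => decide (lo.toNat ≤ (PySem.Chars.upperChar c).toNat) &&
              decide ((PySem.Chars.upperChar c).toNat ≤ hi.toNat)

-- the contents B's loop stores in bucket k, starting at position i (proof-side spec of the dict)
def pvBSpec (k : String) : List String → Int → List Int
  | [], _ => []
  | f :: rest, i => (if pvKey f = k then [i] else []) ++ pvBSpec k rest (i + 1)

-- the positions (from i on) of the files A's predicate keeps, in order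
def pvIdx (lo hi : Char) : List String → Int → List Int
  | [], _ => []
  | f :: rest, i => (if pvPred lo hi f then [i] else []) ++ pvIdx lo hi rest (i + 1)

lemma pvCharLe_toNat {a b : Char} (h : a ≤ b) : a.toNat ≤ b.toNat := Fin.mk_le_mk.mp h

lemma pvIsalpha_le (c : Char) (h : PySem.Chars.isalpha c = true) : c.toNat ≤ 122 := by
  simp only [PySem.Chars.isalpha, PySem.Chars.isupper, PySem.Chars.islower, Bool.or_eq_true,
    Bool.and_eq_true, decide_eq_true_eq] at h
  rcases h with ⟨_, h2⟩ | ⟨_, h2⟩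
  · exact le_trans (pvCharLe_toNat h2) (by decide)
  · exact le_trans (pvCharLe_toNat h2) (by decide)

-- A's branch predicate (membership in the valid_letters run) IS pvPred
lemma pvMem_validLetters (s e c : Char) (he : e.toNat ≤ 122) :
    (pvValidLetters s e).contains c = (decide (s.toNat ≤ c.toNat) && decide (c.toNat ≤ e.toNat)) := by
  rw [List.contains_eq_mem, ← Bool.decide_and]
  apply decide_eq_decide.mpr
  simp only [pvValidLetters, List.mem_map, PySem.List.mem_pyRange_one]
  constructor
  · rintro ⟨i, ⟨h1, h2⟩, rfl⟩
    rw [Char.toNat_ofNat, if_pos (Or.inl (by omega))]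
    omega
  · intro ⟨h1, h2⟩
    exact ⟨(c.toNat : Int), ⟨by exact_mod_cast h1, by omega⟩, by simp⟩

lemma pvAPred_eq (s e : Char) (he : e.toNat ≤ 122) (f : String) :
    (match pvFirstUpper? f with
     | none => false
     | some c => (pvValidLetters s e).contains c) = pvPred s e f := by
  unfold pvFirstUpper? pvPred
  cases f.toList with
  | nil => rfl
  | cons c rest => simpa using pvMem_validLetters s e (PySem.Chars.upperChar c) he

-- the dict after B's grouping loop: bucket k holds exactly pvBSpec k
lemma pvBuckets_getD (fs : List String) : ∀ (i : Int) (d : PySem.Dict String (List Int)) (k : String),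
    PySem.Dict.getD ((PySem.List.enumerate fs i).foldl
      (fun d p => d.insert (pvKey p.2) (PySem.Dict.getD d (pvKey p.2) [] ++ [p.1])) d) k []
    = PySem.Dict.getD d k [] ++ pvBSpec k fs i := by
  induction fs with
  | nil => intro i d k; simp [pvBSpec, PySem.List.enumerate_nil]
  | cons f rest ih =>
    intro i d k
    rw [PySem.List.enumerate_cons, List.foldl_cons, ih, pvBSpec]
    by_cases hk : k = pvKey f
    · subst hk; rw [PySem.Dict.getD_insert]; simp
    · rw [PySem.Dict.getD_insert, if_neg hk]; simp [Ne.symm hk]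

-- a pointwise-append flatMap splits, up to permutation
lemma pvFlatMap_append_perm {α β : Type} (l : List α) (f g : α → List β) :
    (l.flatMap (fun c => f c ++ g c)).Perm (l.flatMap f ++ l.flatMap g) := by
  induction l with
  | nil => simp
  | cons a t ih =>
    simp only [List.flatMap_cons]
    refine ((ih.append_left (f a ++ g a)).trans ?_)
    simp only [List.append_assoc]
    exact (List.perm_append_comm_assoc _ _ _).append_left _

-- equality of the one-character key strings is a code-point equation
lemma pvStrEq (u : Char) (c : Int) (h0 : 0 ≤ c) (h122 : c ≤ 122) :
    (String.ofList [u] = String.ofList [Char.ofNat c.toNat]) ↔ ((u.toNat : Int) = c) := by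
  constructor
  · intro h
    have h2 := congrArg String.toList h
    simp only [String.toList_ofList, List.cons.injEq, and_true] at h2
    have hv : Nat.isValidChar c.toNat := Or.inl (by omega)
    have h3 := Char.toNat_ofNat c.toNat
    rw [if_pos hv] at h3
    rw [h2, h3]; omega
  · intro h
    have hv : Nat.isValidChar c.toNat := Or.inl (by omega)
    have hc : c.toNat = u.toNat := by omega
    rw [hc, Char.ofNat_toNat]

lemma pvSingle_flatMap (lo hi : Char) (he : hi.toNat ≤ 122) (f : String) (j : List Int) :
    (PySem.List.pyRange (lo.toNat : Int) ((hi.toNat : Int) + 1) 1).flatMap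
      (fun c => if pvKey f = String.ofList [Char.ofNat c.toNat] then j else [])
    = if pvPred lo hi f then j else [] := by
  cases hf : f.toList with
  | nil =>
    simp only [pvKey, pvPred, hf]
    rw [if_neg (by simp), List.flatMap_eq_nil_iff]
    intro c _
    rw [if_neg]
    intro h
    have := congrArg String.toList h
    simp at this
  | cons c0 _ =>
    simp only [pvKey, pvPred, hf]
    set u := PySem.Chars.upperChar c0 with hu
    by_cases hp : (lo.toNat : Int) ≤ (u.toNat : Int) ∧ (u.toNat : Int) ≤ (hi.toNat : Int)
    · rw [PySem.List.pyRange_one_append (lo.toNat : Int) (u.toNat : Int) _ (by omega) (by omega)]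
      rw [PySem.List.pyRange_one_cons (a := (u.toNat : Int)) (by omega)]
      simp only [List.flatMap_append, List.flatMap_cons]
      have hmid : (String.ofList [u] = String.ofList [Char.ofNat ((u.toNat : Int)).toNat]) := by
        rw [pvStrEq u _ (by omega) (by omega)]
      rw [if_pos hmid]
      have hleft : (PySem.List.pyRange (lo.toNat : Int) (u.toNat : Int) 1).flatMap
          (fun c => if String.ofList [u] = String.ofList [Char.ofNat c.toNat] then j else []) = [] := by
        rw [List.flatMap_eq_nil_iff]
        intro c hc
        rw [PySem.List.mem_pyRange_one] at hc
        rw [if_neg]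
        rw [pvStrEq u c (by omega) (by omega)]; omega
      have hright : (PySem.List.pyRange ((u.toNat : Int) + 1) ((hi.toNat : Int) + 1) 1).flatMap
          (fun c => if String.ofList [u] = String.ofList [Char.ofNat c.toNat] then j else []) = [] := by
        rw [List.flatMap_eq_nil_iff]
        intro c hc
        rw [PySem.List.mem_pyRange_one] at hc
        rw [if_neg]
        rw [pvStrEq u c (by omega) (by omega)]; omega
      rw [hleft, hright, if_pos (by simp only [Bool.and_eq_true, decide_eq_true_eq]; omega)]
      simp
    · rw [if_neg (by intro h; simp only [Bool.and_eq_true, decide_eq_true_eq] at h; omega)]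
      rw [List.flatMap_eq_nil_iff]
      intro c hc
      rw [PySem.List.mem_pyRange_one] at hc
      rw [if_neg]
      rw [pvStrEq u c (by omega) (by omega)]
      omega

-- the collected buckets are a permutation of the kept positions
lemma pvHits_perm (lo hi : Char) (he : hi.toNat ≤ 122) (fs : List String) : ∀ (i : Int),
    ((PySem.List.pyRange (lo.toNat : Int) ((hi.toNat : Int) + 1) 1).flatMap
      (fun c => pvBSpec (String.ofList [Char.ofNat c.toNat]) fs i)).Perm (pvIdx lo hi fs i) := by
  induction fs with
  | nil => intro i; simp [pvBSpec, pvIdx]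
  | cons f rest ih =>
    intro i
    simp only [pvBSpec, pvIdx]
    refine (pvFlatMap_append_perm _ _ _).trans ?_
    rw [pvSingle_flatMap lo hi he f [i]]
    exact (ih (i + 1)).append_left _

lemma pvIdx_lb (lo hi : Char) (fs : List String) : ∀ (i : Int), ∀ j ∈ pvIdx lo hi fs i, i ≤ j := by
  induction fs with
  | nil => intro i j h; simp [pvIdx] at h
  | cons f rest ih =>
    intro i j h
    simp only [pvIdx, List.mem_append] at h
    rcases h with h | h
    · split at h <;> simp_all
    · have := ih (i + 1) j h; omega

lemma pvIdx_pairwise (lo hi : Char) (fs : List String) : ∀ (i : Int),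
    (pvIdx lo hi fs i).Pairwise (fun a b => a < b) := by
  induction fs with
  | nil => intro i; simp [pvIdx]
  | cons f rest ih =>
    intro i
    simp only [pvIdx]
    refine List.pairwise_append.mpr ⟨by split <;> simp, ih (i + 1), ?_⟩
    intro a ha b hb
    have hb' := pvIdx_lb lo hi rest (i + 1) b hb
    split at ha <;> simp_all

-- mapping the kept positions back through the full list is A's filter
lemma pvIdx_map (lo hi : Char) (fs : List String) : ∀ (i : Int) (g : Int → String),
    (∀ (k : Nat), (h : k < fs.length) → g (i + k) = fs[k]) →
    (pvIdx lo hi fs i).map g = fs.filter (pvPred lo hi) := by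
  induction fs with
  | nil => intro i g _; simp [pvIdx]
  | cons f rest ih =>
    intro i g hg
    have h0 : g i = f := by simpa using hg 0 (by simp)
    have hrest := ih (i + 1) g (fun k hk => by
      have := hg (k + 1) (by simpa using Nat.succ_lt_succ hk)
      simpa [add_assoc, add_comm 1 (k : Int)] using this)
    simp only [pvIdx, List.filter_cons, List.map_append, hrest]
    split <;> simp [h0]

-- ===== VERDICT (by name: the statement is the Claim_ definition above) =====
theorem filter_files_by_name_range_spec : Claim_equal_filter_files_by_name_range := by
  intro files nf _
  unfold Spec_filter_files_by_name_range filter_files_by_name_range filter_files_by_name_range_alt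
  simp only []
  split_ifs with h1 h2
  · -- both take the range branch
    have hcond := h2
    simp only [Bool.and_eq_true, decide_eq_true_eq] at hcond
    obtain ⟨⟨hlo, hhi⟩, _⟩ := hcond
    have he := pvIsalpha_le _ hhi
    -- A's side: the loop is a filter by pvPred
    rw [PySem.List.foldl_append_if_eq_filter]
    rw [List.filter_congr (fun f _ => pvAPred_eq _ _ he f), List.nil_append]
    -- B's side: buckets, hits, sort, map
    rw [PySem.List.foldl_append_eq_flatMap, List.nil_append]
    have hb : ∀ c : Int,
        PySem.Dict.getD ((PySem.List.enumerate files 0).foldl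
          (fun d p => d.insert (pvKey p.2) (PySem.Dict.getD d (pvKey p.2) [] ++ [p.1]))
          PySem.Dict.empty) (String.ofList [Char.ofNat c.toNat]) []
        = pvBSpec (String.ofList [Char.ofNat c.toNat]) files 0 := by
      intro c; rw [pvBuckets_getD]; rfl
    rw [List.flatMap_congr (by intro c _; exact hb c)]
    have hperm := pvHits_perm (lo := PySem.Chars.upperChar ((PySem.Str.strip nf).toList.getD 0 ' '))
      (hi := PySem.Chars.upperChar ((PySem.Str.strip nf).toList.getD 2 ' ')) he files 0
    rw [PySem.List.sorted_eq_of_perm_of_pairwise_lt _ _ _ hperm.symm (pvIdx_pairwise _ _ files 0)]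
    rw [pvIdx_map _ _ files 0 _ (fun k hk => by
      simp [PySem.List.pyGetD_natCast, hk])]
  · rfl
  · rfl
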